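-- pv_equiv track=rewrite | github.com/AdamZhouSE/pythonHomework | Code/CodeRecords/2128/60767/239108.py | RotateAndGetSum
-- ===== SOURCE A (Python) =====
-- def RotateAndGetSum(nums,k):
--     k = k % len(nums)
--     rotatePart = nums[len(nums) - k:]
--     nums[k:] = nums[:len(nums) - k]
--     nums[:k] = rotatePart
--     sum = 0
--     for i in range (0,len(nums)):
--         sum = sum + i*nums[i]
--     return sum
-- ===== SOURCE B (Python) =====
-- def RotateAndGetSum(nums, k):
--     # No rotated list is built: element nums[i] ends up at index (i + k) % n
--     # after a right rotation by k, so the weighted sum is computed directly.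
--     # (Unlike A, this does not mutate nums; return value is identical.)
--     n = len(nums)
--     k = k % n
--     return sum(((i + k) % n) * v for i, v in enumerate(nums))
-- ===== Notes on version B (the rewrite author's own statement) =====
-- stated objective: simpler
-- what changed: B never constructs the rotated list: it computes the weighted sum in one pass using the closed-form target index (i+k)%n of each element, instead of A's slice-based rotation followed by a summing loop.
import Mathlib
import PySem

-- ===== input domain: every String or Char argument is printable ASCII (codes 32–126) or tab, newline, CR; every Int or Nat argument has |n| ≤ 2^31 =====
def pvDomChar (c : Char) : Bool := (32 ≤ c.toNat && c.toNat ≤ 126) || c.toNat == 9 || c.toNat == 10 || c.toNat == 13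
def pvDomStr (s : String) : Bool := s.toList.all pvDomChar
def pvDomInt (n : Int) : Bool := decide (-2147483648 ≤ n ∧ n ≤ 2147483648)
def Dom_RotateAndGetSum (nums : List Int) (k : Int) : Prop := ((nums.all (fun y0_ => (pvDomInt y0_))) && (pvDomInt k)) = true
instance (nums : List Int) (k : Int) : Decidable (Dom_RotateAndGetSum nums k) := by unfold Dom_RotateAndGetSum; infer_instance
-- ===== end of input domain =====

-- B computes the weighted sum in one pass via the closed-form rotated index (i+k)%n,
-- without building the rotated list; A mutates nums in place, B does not (return value only is compared).

-- ===== PORT A =====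
def RotateAndGetSum (nums : List Int) (k : Int) : Int :=
  let n : Int := (nums.length : Int)
  let k1 := PySem.Int.mod k n
  let rotatePart := PySem.List.slice nums (some (n - k1)) none
  let nums1 := PySem.List.slice nums none (some k1) ++ PySem.List.slice nums none (some (n - k1))
  let nums2 := rotatePart ++ PySem.List.slice nums1 (some k1) none
  (PySem.List.pyRange 0 (nums2.length : Int) 1).foldl (fun s i => s + i * PySem.List.pyGetD nums2 i 0) 0

-- ===== PORT B =====
def RotateAndGetSum_alt (nums : List Int) (k : Int) : Int :=
  let n : Int := (nums.length : Int)
  let k1 := PySem.Int.mod k n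
  (PySem.List.enumerate nums 0).foldl (fun s p => s + (PySem.Int.mod (p.1 + k1) n) * p.2) 0

-- ===== PRECONDITION & SPEC =====
-- Pre_ excludes only the empty list, on which A's 'k % len(nums)' raises ZeroDivisionError.
def Pre_RotateAndGetSum (nums : List Int) (k : Int) : Prop := nums ≠ []
instance (nums : List Int) (k : Int) : Decidable (Pre_RotateAndGetSum nums k) := by unfold Pre_RotateAndGetSum; infer_instance
def pvWitness_RotateAndGetSum : List Int × Int := ([3, -1, 4], 5)

def Spec_RotateAndGetSum (nums : List Int) (k : Int) (out : Int) : Prop := out = RotateAndGetSum_alt nums k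
instance (nums : List Int) (k : Int) (out : Int) : Decidable (Spec_RotateAndGetSum nums k out) := by unfold Spec_RotateAndGetSum; infer_instance

-- ===== CLAIM (what is proved, stated in full; the proofs are below) =====
def Claim_equal_RotateAndGetSum : Prop := ∀ (nums : List Int) (k : Int), Dom_RotateAndGetSum nums k → Pre_RotateAndGetSum nums k → Spec_RotateAndGetSum nums k (RotateAndGetSum nums k)

-- ===== LEMMAS AND PROOFS =====

-- weighted sum over an enumeration, with a congruence shifting the start index
lemma enumSum_congr (xs : List Int) (s s' : Int) (f g : Int → Int)
    (h : ∀ i : Nat, i < xs.length → f (s + i) = g (s' + i)) :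
    ((PySem.List.enumerate xs s).map (fun p => f p.1 * p.2)).sum
      = ((PySem.List.enumerate xs s').map (fun p => g p.1 * p.2)).sum := by
  induction xs generalizing s s' with
  | nil => simp [PySem.List.enumerate]
  | cons x t ih =>
    have h0 : f s = g s' := by simpa using h 0 (by simp)
    have hrec := ih (s + 1) (s' + 1) (by
      intro i hi
      have := h (i + 1) (by simpa using Nat.succ_lt_succ hi)
      have e : s + 1 + (i:Int) = s + ((i:Int)+1) := by ring
      have e' : s' + 1 + (i:Int) = s' + ((i:Int)+1) := by ring
      rw [e, e']
      exact_mod_cast this)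
    simp [PySem.List.enumerate_cons, h0, hrec]

lemma mod_bounds (k : Int) (n : Int) (hn : 0 < n) :
    0 ≤ PySem.Int.mod k n ∧ PySem.Int.mod k n < n := by
  rw [PySem.Int.mod_eq_emod_of_pos hn]
  exact ⟨Int.emod_nonneg k (by omega), Int.emod_lt_of_pos k hn⟩

lemma mod_small (a n : Int) (h0 : 0 ≤ a) (h1 : a < n) : PySem.Int.mod a n = a := by
  rw [PySem.Int.mod_eq_emod_of_pos (by omega)]
  exact Int.emod_eq_of_lt h0 h1

lemma mod_add_self (a n : Int) (h0 : 0 ≤ a) (h1 : a < n) : PySem.Int.mod (n + a) n = a := by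
  rw [PySem.Int.mod_eq_emod_of_pos (by omega), Int.add_comm, Int.add_emod_right]
  exact Int.emod_eq_of_lt h0 h1

-- ===== VERDICT (by name: the statement is the Claim_ definition above) =====
theorem RotateAndGetSum_spec : Claim_equal_RotateAndGetSum := by
  intro nums k _ hpre
  simp only [Spec_RotateAndGetSum, RotateAndGetSum, RotateAndGetSum_alt]
  have hn : (0:Int) < (nums.length : Int) := by
    have := List.length_pos_iff.mpr hpre
    exact_mod_cast this
  obtain ⟨hk0, hk1⟩ := mod_bounds k (nums.length : Int) hn
  set k1 := PySem.Int.mod k (nums.length : Int) with hk1def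
  set K := k1.toNat with hKdef
  set T := ((nums.length : Int) - k1).toNat with hTdef
  have hKcast : (K : Int) = k1 := Int.toNat_of_nonneg hk0
  have hTcast : (T : Int) = (nums.length : Int) - k1 := Int.toNat_of_nonneg (by omega)
  have hKle : K ≤ nums.length := by omega
  have hTeq : T = nums.length - K := by omega
  -- evaluate the slices of port A
  have h1 : PySem.List.slice nums (some ((nums.length : Int) - k1)) none = nums.drop T := by
    rw [PySem.List.slice_from nums (by omega)]
  have h2 : PySem.List.slice nums none (some k1) = nums.take K := by
    rw [PySem.List.slice_to nums hk0]
  have h3 : PySem.List.slice nums none (some ((nums.length : Int) - k1)) = nums.take T := by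
    rw [PySem.List.slice_to nums (by omega)]
  have hlen_takeK : (nums.take K).length = K := by simp [hKle]
  have h4 : PySem.List.slice (nums.take K ++ nums.take T) (some k1) none = nums.take T := by
    rw [PySem.List.slice_from _ hk0, ← hKdef]
    have := List.drop_left (l₁ := List.take K nums) (l₂ := List.take T nums)
    rwa [hlen_takeK] at this
  simp only [h1, h2, h3, h4]
  -- both loops as sums over enumerations
  rw [PySem.List.foldl_add, PySem.List.foldl_add]
  have hA : (List.map (fun i => i * PySem.List.pyGetD (nums.drop T ++ nums.take T) i 0)
        (PySem.List.pyRange 0 ((nums.drop T ++ nums.take T).length : Int) 1)).sum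
      = ((PySem.List.enumerate (nums.drop T ++ nums.take T) 0).map (fun p => p.1 * p.2)).sum := by
    rw [PySem.List.enumerate_eq_map_pyRange (d := 0), List.map_map]
    simp only [PySem.List.len_eq, Function.comp_def]
  rw [hA]
  -- split both enumerations
  have hsplit2 : nums = nums.take T ++ nums.drop T := (List.take_append_drop T nums).symm
  have hTle : T ≤ nums.length := by omega
  have hdlen : nums.length - T = K := by omega
  rw [PySem.List.enumerate_append]
  conv_rhs => rw [hsplit2, PySem.List.enumerate_append]
  simp only [List.take_append_drop, List.map_append, List.sum_append, List.length_drop,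
    List.length_take, Nat.min_eq_left hTle, hdlen, zero_add]
  have hS1 : ((PySem.List.enumerate (nums.drop T) 0).map (fun p => p.1 * p.2)).sum
      = ((PySem.List.enumerate (nums.drop T) (T : Int)).map
          (fun p => PySem.Int.mod (p.1 + k1) (nums.length : Int) * p.2)).sum := by
    apply enumSum_congr (f := fun x => x) (g := fun x => PySem.Int.mod (x + k1) (nums.length : Int))
    intro i hi
    rw [List.length_drop] at hi
    have hilt : i < K := by omega
    have harg : (T:Int) + (i:Int) + k1 = (nums.length : Int) + i := by
      rw [hTcast]; ring
    rw [harg, mod_add_self (i:Int) (nums.length : Int) (by positivity)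
      (by exact_mod_cast Nat.lt_of_lt_of_le hilt hKle)]
    omega
  have hS2 : ((PySem.List.enumerate (nums.take T) (K : Int)).map (fun p => p.1 * p.2)).sum
      = ((PySem.List.enumerate (nums.take T) 0).map
          (fun p => PySem.Int.mod (p.1 + k1) (nums.length : Int) * p.2)).sum := by
    apply enumSum_congr (f := fun x => x) (g := fun x => PySem.Int.mod (x + k1) (nums.length : Int))
    intro i hi
    rw [List.length_take] at hi
    have hilt : i < T := by omega
    have hsm : PySem.Int.mod ((0:Int) + (i:Int) + k1) (nums.length : Int) = (i:Int) + k1 := by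
      have hz : (0:Int) + (i:Int) + k1 = (i:Int) + k1 := by ring
      rw [hz]
      have hlt : (i:Int) < (T:Int) := by exact_mod_cast hilt
      exact mod_small _ _ (by positivity) (by omega)
    rw [hsm]
    omega
  rw [hS1, hS2]
  ring
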